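-- pv_equiv track=rewrite | github.com/lxcxjxhx/HOS-M2F | hos_m2f/converters/md_to_xml.py | _escape_xml
-- ===== SOURCE A (Python) =====
-- def _escape_xml(text: str) -> str:
--     """转义XML特殊字符
--
--     Args:
--         text: 原始文本
--
--     Returns:
--         str: 转义后的文本
--     """
--     escape_map = {
--         '&': '&amp;',
--         '<': '&lt;',
--         '>': '&gt;',
--         '"': '&quot;',
--         "'": '&apos;'
--     }
--
--     for char, replacement in escape_map.items():
--         text = text.replace(char, replacement)
--
--     return text
-- ===== SOURCE B (Python) =====
-- def _escape_xml(text: str) -> str: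
--     """Escape XML special characters in a single character-wise pass."""
--     escape_map = {
--         '&': '&amp;',
--         '<': '&lt;',
--         '>': '&gt;',
--         '"': '&quot;',
--         "'": '&apos;'
--     }
--     return ''.join(escape_map.get(ch, ch) for ch in text)
-- ===== Notes on version B (the rewrite author's own statement) =====
-- stated objective: idiomatic
-- what changed: B makes one character-wise pass appending escape_map.get(ch, ch) and joins the pieces, instead of A's five sequential full-string .replace passes.
import Mathlib
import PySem

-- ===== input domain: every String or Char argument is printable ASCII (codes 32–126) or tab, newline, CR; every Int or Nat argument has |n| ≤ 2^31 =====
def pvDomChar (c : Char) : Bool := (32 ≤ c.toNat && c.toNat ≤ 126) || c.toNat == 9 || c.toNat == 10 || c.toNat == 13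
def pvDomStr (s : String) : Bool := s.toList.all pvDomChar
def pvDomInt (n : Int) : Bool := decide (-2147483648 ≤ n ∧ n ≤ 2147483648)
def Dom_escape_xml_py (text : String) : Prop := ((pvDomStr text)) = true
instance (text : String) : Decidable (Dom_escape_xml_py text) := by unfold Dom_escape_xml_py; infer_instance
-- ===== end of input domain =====

-- B replaces A's five sequential full-string .replace passes by one character-wise pass with escape_map.get (idiomatic); return values agree.

-- ===== PORT A =====
-- A's escape_map dict
def pvEscapeMap : PySem.Dict String String :=
  PySem.Dict.ofList [("&", "&amp;"), ("<", "&lt;"), (">", "&gt;"), ("\"", "&quot;"), ("'", "&apos;")]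

-- for char, replacement in escape_map.items(): text = text.replace(char, replacement); return text
def escape_xml_py (text : String) : String :=
  pvEscapeMap.items.foldl (fun t p => PySem.Str.replace t p.1 p.2) text

-- ===== PORT B =====
-- return ''.join(escape_map.get(ch, ch) for ch in text)
def escape_xml_py_alt (text : String) : String :=
  PySem.Str.join "" (text.toList.map (fun c => pvEscapeMap.getD (String.ofList [c]) (String.ofList [c])))

-- ===== PRECONDITION & SPEC =====
def Spec_escape_xml_py (text : String) (out : String) : Prop := out = escape_xml_py_alt text
instance (text : String) (out : String) : Decidable (Spec_escape_xml_py text out) := by unfold Spec_escape_xml_py; infer_instance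

-- ===== CLAIM (what is proved, stated in full; the proofs are below) =====
def Claim_equal_escape_xml_py : Prop := ∀ (text : String), Dom_escape_xml_py text → Spec_escape_xml_py text (escape_xml_py text)

-- ===== LEMMAS AND PROOFS =====

-- the go loop of single-character replace is a per-character flatMap
theorem go_single (c : Char) (new : List Char) (l : List Char) :
    ∀ (fuel : Nat) (acc : List Char), l.length ≤ fuel →
    PySem.Chars.replace.go [c] new fuel l acc
      = acc.reverse ++ l.flatMap (fun x => if x = c then new else [x]) := by
  induction l with
  | nil =>
    intro fuel acc _
    cases fuel <;> simp [PySem.Chars.replace.go]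
  | cons x t ih =>
    intro fuel acc h
    cases fuel with
    | zero => simp at h
    | succ n =>
      rw [PySem.Chars.replace.go.eq_def]
      simp only [List.isPrefixOf, Bool.and_true]
      by_cases hx : c = x
      · subst hx
        simp only [beq_self_eq_true, if_true, List.length_cons, List.drop_succ_cons,
          List.length_nil, List.drop_zero]
        rw [ih n (new.reverse ++ acc) (Nat.le_of_succ_le_succ h)]
        simp
      · have hb : (c == x) = false := by simp [hx]
        simp only [hb, Bool.false_eq_true, if_false]
        rw [ih n (x :: acc) (Nat.le_of_succ_le_succ h)]
        simp [Ne.symm hx]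

-- single-character replace is a per-character flatMap
theorem replace_single (c : Char) (new : List Char) (s : List Char) :
    PySem.Chars.replace s [c] new = s.flatMap (fun x => if x = c then new else [x]) := by
  rw [PySem.Chars.replace]
  simp only [List.isEmpty_cons, Bool.false_eq_true, if_false]
  exact go_single c new s s.length [] le_rfl

theorem join_empty (cs : List (List Char)) : PySem.Chars.join [] cs = cs.flatten := by
  simp only [PySem.Chars.join, List.intercalate]
  induction cs with
  | nil => simp
  | cons h t ih =>
    cases t with
    | nil => simp
    | cons h2 t2 => simpa [List.intersperse] using ih

-- the per-character escape used on B's side, as a list function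
def pvEsc (c : Char) : List Char :=
  (pvEscapeMap.getD (String.ofList [c]) (String.ofList [c])).toList

-- the five single-character passes of A compose, per character, to B's escape
theorem pointwise (c : Char) :
    ((if c = '&' then "&amp;".toList else [c]).flatMap (fun x =>
      (if x = '<' then "&lt;".toList else [x]).flatMap (fun x =>
        (if x = '>' then "&gt;".toList else [x]).flatMap (fun x =>
          (if x = '\"' then "&quot;".toList else [x]).flatMap (fun x =>
            if x = '\'' then "&apos;".toList else [x]))))) = pvEsc c := by
  by_cases h1 : c = '&'; · subst h1; decide
  by_cases h2 : c = '<'; · subst h2; decide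
  by_cases h3 : c = '>'; · subst h3; decide
  by_cases h4 : c = '"'; · subst h4; decide
  by_cases h5 : c = '\''; · subst h5; decide
  have e1 : ("&" == String.ofList [c]) = false := by
    rw [beq_eq_false_iff_ne]; intro hc; apply h1
    simpa using congrArg String.toList hc.symm
  have e2 : ("<" == String.ofList [c]) = false := by
    rw [beq_eq_false_iff_ne]; intro hc; apply h2
    simpa using congrArg String.toList hc.symm
  have e3 : (">" == String.ofList [c]) = false := by
    rw [beq_eq_false_iff_ne]; intro hc; apply h3
    simpa using congrArg String.toList hc.symm
  have e4 : ("\"" == String.ofList [c]) = false := by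
    rw [beq_eq_false_iff_ne]; intro hc; apply h4
    simpa using congrArg String.toList hc.symm
  have e5 : ("'" == String.ofList [c]) = false := by
    rw [beq_eq_false_iff_ne]; intro hc; apply h5
    simpa using congrArg String.toList hc.symm
  have hd : pvEscapeMap = PySem.Dict.mk
      [("&", "&amp;"), ("<", "&lt;"), (">", "&gt;"), ("\"", "&quot;"), ("'", "&apos;")] := by decide
  simp [pvEsc, hd, PySem.Dict.getD, PySem.Dict.get?,
    e1, e2, e3, e4, e5, h1, h2, h3, h4, h5]

-- ===== VERDICT (by name: the statement is the Claim_ definition above) =====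
theorem tl_inj (s t : String) (h : s.toList = t.toList) : s = t := by
  simpa [String.ofList_toList] using congrArg String.ofList h

set_option maxHeartbeats 1000000 in
theorem escape_xml_py_spec : Claim_equal_escape_xml_py := by
  intro text _
  show escape_xml_py text = escape_xml_py_alt text
  apply tl_inj
  unfold escape_xml_py escape_xml_py_alt
  have hitems : pvEscapeMap.items =
      [("&", "&amp;"), ("<", "&lt;"), (">", "&gt;"), ("\"", "&quot;"), ("'", "&apos;")] := by decide
  rw [hitems]
  simp only [List.foldl_cons, List.foldl_nil]
  have t0 : "".toList = ([] : List Char) := by decide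
  have t1 : "&".toList = ['&'] := by decide
  have t2 : "<".toList = ['<'] := by decide
  have t3 : ">".toList = ['>'] := by decide
  have t4 : "\"".toList = ['"'] := by decide
  have t5 : "'".toList = ['\''] := by decide
  simp only [PySem.Str.toList_replace, PySem.Str.toList_join,
    t0, t1, t2, t3, t4, t5, replace_single]
  rw [join_empty]
  rw [List.map_map]
  rw [show (String.toList ∘ fun c => pvEscapeMap.getD (String.ofList [c]) (String.ofList [c]))
      = pvEsc from rfl]
  rw [← List.flatMap_def]
  simp only [List.flatMap_assoc]
  simp only [pointwise]
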